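-- pv_equiv track=rewrite | github.com/sanDer153/AdventOfCode2021 | day_12.py | examine
-- ===== SOURCE A (Python) =====
-- ACCEPT = 0
--
-- ABANDON = 1
--
-- CONTINUE = 2
--
-- def examine(partial_solution):
--     double_small_cave = ''
--     for node in partial_solution:
--         if node.islower() and partial_solution.count(node) == 2 and node != 'start' and node != 'end':
--             double_small_cave = node
--
--     if any(partial_solution.count(x) > 1 and x.islower() and x != double_small_cave for x in partial_solution):
--         return ABANDON
--     elif partial_solution[-1] == 'end':
--         return ACCEPT
--     else:
--         return CONTINUE
-- ===== SOURCE B (Python) =====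
-- ACCEPT = 0
--
-- ABANDON = 1
--
-- CONTINUE = 2
--
-- def examine(partial_solution):
--     counts = {}
--     for node in partial_solution:
--         counts[node] = counts.get(node, 0) + 1
--     repeated = [c for c, n in counts.items() if n > 1 and c.islower()]
--     ok = (not repeated) or (len(repeated) == 1
--                             and counts[repeated[0]] == 2
--                             and repeated[0] != 'start'
--                             and repeated[0] != 'end')
--     if not ok:
--         return ABANDON
--     if partial_solution[-1] == 'end':
--         return ACCEPT
--     return CONTINUE
-- ===== Notes on version B (the rewrite author's own statement) =====
-- stated objective: faster
-- what changed: A repeatedly rescans the list (list.count inside both a sentinel-finding loop and an any() rescan, O(n^2)); B builds one hash count table and decides validity by a single structured check on the distinct repeated lowercase caves.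
import Mathlib
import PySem

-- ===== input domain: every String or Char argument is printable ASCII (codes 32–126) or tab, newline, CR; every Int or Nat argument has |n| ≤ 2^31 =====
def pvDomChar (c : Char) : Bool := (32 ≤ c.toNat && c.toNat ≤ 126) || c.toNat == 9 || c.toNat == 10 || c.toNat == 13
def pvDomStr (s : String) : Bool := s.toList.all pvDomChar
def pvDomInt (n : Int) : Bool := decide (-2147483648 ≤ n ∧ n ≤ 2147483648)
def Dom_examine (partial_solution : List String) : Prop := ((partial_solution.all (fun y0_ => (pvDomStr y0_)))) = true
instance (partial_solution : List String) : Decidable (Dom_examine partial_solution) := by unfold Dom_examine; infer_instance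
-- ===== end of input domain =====

-- B replaces A's find-the-double sentinel + quadratic list.count rescans by one count table and a
-- single structured validity check over its distinct repeated small caves (objective: faster,
-- measured; equivalence is about the return value only).

-- str.islower(), ported by hand (exact on the ASCII domain: some cased char, no uppercase one)
def pyStrIslower (s : String) : Bool :=
  s.toList.any PySem.Chars.islower && s.toList.all (fun c => !(PySem.Chars.isupper c))

-- ===== PORT A =====
def examine (partial_solution : List String) : Int :=
  let dsc := partial_solution.foldl (fun acc node =>
    if pyStrIslower node && (PySem.List.count partial_solution node == 2)
        && node != "start" && node != "end" then node else acc) ""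
  if partial_solution.any (fun x =>
      decide (1 < PySem.List.count partial_solution x) && pyStrIslower x && x != dsc) then 1
  else if PySem.List.pyGetD partial_solution (-1) "" == "end" then 0
  else 2

-- ===== PORT B =====
def examine_alt (partial_solution : List String) : Int :=
  let counts := partial_solution.foldl
    (fun d node => d.insert node (d.getD node 0 + 1)) PySem.Dict.empty
  let repeated := (counts.items.filter
    (fun p => decide ((1 : Int) < p.2) && pyStrIslower p.1)).map Prod.fst
  let ok := repeated.isEmpty ||
    (repeated.length == 1 && (counts.getD (repeated.getD 0 "") 0 == 2)
      && repeated.getD 0 "" != "start" && repeated.getD 0 "" != "end")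
  if !ok then 1
  else if PySem.List.pyGetD partial_solution (-1) "" == "end" then 0
  else 2

-- ===== PRECONDITION & SPEC =====
-- Pre_ excludes only the empty list, where both Pythons raise IndexError on partial_solution[-1].
def Pre_examine (partial_solution : List String) : Prop := partial_solution ≠ []
instance (partial_solution : List String) : Decidable (Pre_examine partial_solution) := by unfold Pre_examine; infer_instance
def pvWitness_examine : List String := ["start", "b", "b", "end"]
def Spec_examine (partial_solution : List String) (out : Int) : Prop := out = examine_alt partial_solution
instance (partial_solution : List String) (out : Int) : Decidable (Spec_examine partial_solution out) := by unfold Spec_examine; infer_instance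

-- ===== CLAIM (what is proved, stated in full; the proofs are below) =====
def Claim_equal_examine : Prop := ∀ (partial_solution : List String), Dom_examine partial_solution → Pre_examine partial_solution → Spec_examine partial_solution (examine partial_solution)

-- ===== LEMMAS AND PROOFS =====

-- the fold keeping the last element satisfying p: value when nothing satisfies p
theorem foldl_keep_none {α : Type} (p : α → Bool) (xs : List α) (a : α)
    (h : ∀ x ∈ xs, p x = false) :
    xs.foldl (fun acc n => if p n then n else acc) a = a := by
  induction xs generalizing a with
  | nil => rfl
  | cons x xs ih =>
    have hx := h x (by simp)
    simp only [List.foldl_cons, hx, Bool.false_eq_true, if_false]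
    exact ih a (fun y hy => h y (by simp [hy]))

-- value when everything satisfying p equals c and something does
theorem foldl_keep_eq {α : Type} (p : α → Bool) (xs : List α) (c a : α)
    (h1 : ∀ x ∈ xs, p x = true → x = c) (h2 : ∃ x ∈ xs, p x = true) :
    xs.foldl (fun acc n => if p n then n else acc) a = c := by
  induction xs generalizing a with
  | nil => simp at h2
  | cons x xs ih =>
    by_cases hp : p x = true
    · have hxc : x = c := h1 x (by simp) hp
      subst hxc
      simp only [List.foldl_cons, hp, if_true]
      by_cases h3 : ∃ y ∈ xs, p y = true
      · exact ih x (fun y hy => h1 y (by simp [hy])) h3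
      · exact foldl_keep_none p xs x (fun y hy => by
          by_contra hne
          exact h3 ⟨y, hy, by simpa using hne⟩)
    · simp only [List.foldl_cons, hp, Bool.false_eq_true, if_false]
      obtain ⟨y, hy, hpy⟩ := h2
      rcases List.mem_cons.mp hy with rfl | hy'
      · exact absurd hpy hp
      · exact ih a (fun z hz => h1 z (by simp [hz])) ⟨y, hy', hpy⟩

theorem pyStrIslower_empty : pyStrIslower "" = false := by decide

-- the repeated-small-cave predicate both programs test
def pvQ (ps : List String) (c : String) : Bool :=
  decide (1 < List.count c ps) && pyStrIslower c

-- B's list of distinct repeated small caves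
def pvR (ps : List String) : List String := (PySem.Set.ofList ps).filter (pvQ ps)

theorem mem_pvR (ps : List String) (x : String) :
    x ∈ pvR ps ↔ x ∈ ps ∧ pvQ ps x = true := by
  simp [pvR, List.mem_filter, PySem.Set.mem_ofList]

theorem nodup_pvR (ps : List String) : (pvR ps).Nodup :=
  (PySem.Set.nodup_ofList ps).filter _

-- A's sentinel predicate (lowercase, count exactly 2, not start/end)
def pvP2 (ps : List String) (c : String) : Bool :=
  pyStrIslower c && (List.count c ps == 2) && c != "start" && c != "end"

theorem pvP2_imp_pvQ (ps : List String) (c : String) (h : pvP2 ps c = true) :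
    pvQ ps c = true := by
  simp only [pvP2, pvQ, Bool.and_eq_true, beq_iff_eq, bne_iff_ne, decide_eq_true_eq] at h ⊢
  exact ⟨by rw [h.1.1.2]; norm_num, h.1.1.1⟩

-- B's repeated list, in counter vocabulary
theorem repeated_eq (ps : List String) :
    (((PySem.Dict.counter ps).items.filter
      (fun p => decide ((1 : Int) < p.2) && pyStrIslower p.1)).map Prod.fst) = pvR ps := by
  rw [PySem.Dict.items_counter, List.filter_map, List.map_map]
  simp only [Function.comp_def, Nat.one_lt_cast]
  rw [List.map_id']
  rfl

-- the core: A's abandon test equals the negation of B's validity check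
theorem core (ps : List String) :
    (ps.any (fun x => decide (1 < List.count x ps) && pyStrIslower x &&
        x != ps.foldl (fun acc node => if pvP2 ps node then node else acc) "")) =
    !((pvR ps).isEmpty ||
      ((pvR ps).length == 1 && (((List.count ((pvR ps).getD 0 "") ps : Int)) == 2)
        && (pvR ps).getD 0 "" != "start" && (pvR ps).getD 0 "" != "end")) := by
  rw [Bool.eq_iff_iff]
  simp only [List.any_eq_true, Bool.and_eq_true, decide_eq_true_eq, bne_iff_ne,
    Bool.not_eq_true', Bool.or_eq_false_iff, Bool.and_eq_false_iff,
    List.isEmpty_eq_false_iff, List.length_eq_one_iff, beq_eq_false_iff_ne,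
    bne_eq_false_iff_eq, ne_eq]
  rcases hR : pvR ps with _ | ⟨c, rest⟩
  · constructor
    · rintro ⟨x, hx, ⟨h1, h2⟩, -⟩
      have hmem : x ∈ pvR ps := (mem_pvR ps x).mpr ⟨hx, by simp [pvQ, h1, h2]⟩
      rw [hR] at hmem
      simp at hmem
    · rintro ⟨hne, -⟩
      exact absurd rfl hne
  · have hc : c ∈ ps ∧ pvQ ps c = true := (mem_pvR ps c).mp (by rw [hR]; simp)
    have hql : pyStrIslower c = true ∧ 1 < List.count c ps := by
      have hq := hc.2
      simp only [pvQ, Bool.and_eq_true, decide_eq_true_eq] at hq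
      exact ⟨hq.2, hq.1⟩
    rcases rest with _ | ⟨c2, rest2⟩
    · -- exactly one distinct repeated small cave c
      have honly : ∀ x, x ∈ ps → pvQ ps x = true → x = c := by
        intro x hx hqx
        have hmem : x ∈ pvR ps := (mem_pvR ps x).mpr ⟨hx, hqx⟩
        rw [hR] at hmem
        simpa using hmem
      simp only [List.getD_cons_zero]
      by_cases hp2 : pvP2 ps c = true
      · have hdsc : List.foldl (fun acc node => if pvP2 ps node = true then node else acc) "" ps = c :=
          foldl_keep_eq _ ps c "" (fun x hx hpx => honly x hx (pvP2_imp_pvQ ps x hpx)) ⟨c, hc.1, hp2⟩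
        have hp2' : List.count c ps = 2 ∧ c ≠ "start" ∧ c ≠ "end" := by
          simp only [pvP2, Bool.and_eq_true, beq_iff_eq, bne_iff_ne] at hp2
          exact ⟨hp2.1.1.2, hp2.1.2, hp2.2⟩
        constructor
        · rintro ⟨x, hx, ⟨h1, h2⟩, hxne⟩
          rw [hdsc] at hxne
          exact absurd (honly x hx (by simp [pvQ, h1, h2])) hxne
        · rintro ⟨-, h⟩
          exfalso
          rcases h with ((h | h) | h) | h
          · exact h ⟨c, rfl⟩
          · exact h (by exact_mod_cast hp2'.1)
          · exact hp2'.2.1 h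
          · exact hp2'.2.2 h
      · have hnone : ∀ x ∈ ps, pvP2 ps x = false := by
          intro x hx
          by_contra hne
          rw [Bool.not_eq_false] at hne
          have hxc := honly x hx (pvP2_imp_pvQ ps x hne)
          rw [hxc] at hne
          exact hp2 hne
        have hdsc := foldl_keep_none (pvP2 ps) ps "" hnone
        have hcne : c ≠ "" := by
          intro h
          have := hql.1
          rw [h, pyStrIslower_empty] at this
          exact Bool.false_ne_true this
        constructor
        · intro _
          refine ⟨by simp, ?_⟩
          have hnp : ¬(List.count c ps = 2 ∧ c ≠ "start" ∧ c ≠ "end") := by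
            rintro ⟨h1, h2, h3⟩
            exact hp2 (by simp [pvP2, hql.1, h1, h2, h3])
          by_cases h1 : List.count c ps = 2
          · by_cases h2 : c = "start"
            · exact Or.inl (Or.inr h2)
            · by_cases h3 : c = "end"
              · exact Or.inr h3
              · exact absurd ⟨h1, h2, h3⟩ hnp
          · exact Or.inl (Or.inl (Or.inr (fun hcast => h1 (by exact_mod_cast hcast))))
        · intro _
          exact ⟨c, hc.1, ⟨hql.2, hql.1⟩, by rw [hdsc]; exact hcne⟩
    · -- at least two distinct repeated small caves
      have hc2 : c2 ∈ ps ∧ pvQ ps c2 = true := (mem_pvR ps c2).mp (by rw [hR]; simp)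
      have hq2 : pyStrIslower c2 = true ∧ 1 < List.count c2 ps := by
        have hq := hc2.2
        simp only [pvQ, Bool.and_eq_true, decide_eq_true_eq] at hq
        exact ⟨hq.2, hq.1⟩
      have hne : c ≠ c2 := by
        have hnd := nodup_pvR ps
        rw [hR] at hnd
        intro h
        exact (List.nodup_cons.mp hnd).1 (by rw [h]; simp)
      constructor
      · intro _
        refine ⟨by simp, Or.inl (Or.inl (Or.inl ?_))⟩
        rintro ⟨a, ha⟩
        simp at ha
      · intro _
        by_cases hcd : c = List.foldl (fun acc node => if pvP2 ps node = true then node else acc) "" ps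
        · exact ⟨c2, hc2.1, ⟨hq2.2, hq2.1⟩, fun h => hne (hcd.trans h.symm)⟩
        · exact ⟨c, hc.1, ⟨hql.2, hql.1⟩, hcd⟩

theorem examine_spec : Claim_equal_examine := by
  intro ps hdom hpre
  show examine ps = examine_alt ps
  unfold examine examine_alt
  simp only [PySem.List.count_eq, PySem.Dict.foldl_insert_getD_add_one_eq_counter,
    repeated_eq, PySem.Dict.getD_counter]
  simp only [show ∀ node : String,
      (pyStrIslower node && (List.count node ps == 2) && node != "start" && node != "end")
        = pvP2 ps node from fun _ => rfl]
  exact if_congr (iff_of_eq (congrArg (· = true) (core ps))) rfl rfl
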